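-- pv_equiv track=rewrite | github.com/zuokangjia/DanmakuConvert | danmaku_convert.py | get_text_line_num
-- ===== SOURCE A (Python) =====
-- def get_text_line_num(text):
--     line_num = 1
--     result_text = text
--
--     if len(text) > 10:
--         result_text = ''
--         for i in range(0, len(text), 10):
--             chunk = text[i:i+10]
--             result_text += chunk
--             if i + 10 < len(text):
--                 result_text += "\\N"
--                 line_num += 1
--
--     return result_text, line_num
-- ===== SOURCE B (Python) =====
-- def get_text_line_num(text):
--     chunks = []
--     rest = text
--     while True:
--         chunks.append(rest[:10])
--         rest = rest[10:]
--         if not rest: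
--             break
--     return "\\N".join(chunks), len(chunks)
-- ===== Notes on version B (the rewrite author's own statement) =====
-- stated objective: alternative
-- what changed: Replaces A's step-10 index loop with absolute slices and an in-loop break test by a front-peeling loop that builds the list of 10-char chunks and then joins them once with '\N', taking the line count as the number of chunks; it trades speed for a plainer chunk-list decomposition.
import Mathlib
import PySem

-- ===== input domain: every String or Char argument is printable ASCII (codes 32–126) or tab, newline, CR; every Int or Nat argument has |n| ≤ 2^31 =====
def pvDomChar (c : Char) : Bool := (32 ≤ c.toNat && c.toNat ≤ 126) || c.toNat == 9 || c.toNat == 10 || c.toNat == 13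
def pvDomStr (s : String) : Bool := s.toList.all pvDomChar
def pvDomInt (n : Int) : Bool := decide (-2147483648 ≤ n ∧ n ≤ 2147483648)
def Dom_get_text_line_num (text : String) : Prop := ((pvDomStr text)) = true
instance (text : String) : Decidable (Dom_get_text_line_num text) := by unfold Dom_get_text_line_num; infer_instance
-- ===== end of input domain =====

-- B replaces A's step-10 index loop over absolute slices by a while-loop that peels ten
-- characters off the front into a chunk list and joins once with "\N" (objective: alternative).


-- ===== PORT A =====
-- literal transliteration of A: for i in range(0, len(text), 10): slice, append chunk, conditional "\N"
def get_text_line_num (text : String) : String × Int :=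
  if PySem.Str.len text > 10 then
    let r := (PySem.List.pyRange 0 (PySem.Str.len text) 10).foldl
      (fun (acc : List Char × Int) i =>
        let chunk := PySem.List.slice text.toList (some i) (some (i + 10))
        let rt := acc.1 ++ chunk
        if i + 10 < PySem.Str.len text then (rt ++ ['\\', 'N'], acc.2 + 1)
        else (rt, acc.2))
      ([], 1)
    (String.ofList r.1, r.2)
  else (text, 1)

-- ===== PORT B =====
-- literal transliteration of B: the while loop 'chunks.append(rest[:10]); rest = rest[10:];
-- if not rest: break' becomes the obvious structural recursion on rest
def altChunks (cs : List Char) : List (List Char) :=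
  let chunk := PySem.List.slice cs none (some 10)
  let rest := PySem.List.slice cs (some 10) none
  if h : rest = [] then [chunk] else chunk :: altChunks rest
termination_by cs.length
decreasing_by
  have h2 : cs.drop 10 ≠ [] := by
    rw [show (10:Nat) = (10:Int).toNat from rfl, ← PySem.List.slice_from cs (by norm_num : (0:Int) ≤ 10)]
    exact h
  rw [PySem.List.slice_from cs (by norm_num)]
  rcases cs.length.lt_or_ge 11 with hl | hl
  · exact absurd (List.drop_eq_nil_of_le (by omega)) h2
  · simp; omega

def get_text_line_num_alt (text : String) : String × Int :=
  let chunks := (altChunks text.toList).map String.ofList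
  (PySem.Str.join "\\N" chunks, (chunks.length : Int))

-- ===== PRECONDITION & SPEC =====
def Spec_get_text_line_num (text : String) (out : String × Int) : Prop := out = get_text_line_num_alt text
instance (text : String) (out : String × Int) : Decidable (Spec_get_text_line_num text out) := by unfold Spec_get_text_line_num; infer_instance

-- ===== CLAIM (what is proved, stated in full; the proofs are below) =====
def Claim_equal_get_text_line_num : Prop := ∀ (text : String), Dom_get_text_line_num text → Spec_get_text_line_num text (get_text_line_num text)

-- ===== LEMMAS AND PROOFS =====

-- the chunked result both programs are proved equal to
def chunkSpec (cs : List Char) : List Char × Int :=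
  if h : cs.length ≤ 10 then (cs, 1)
  else
    let r := chunkSpec (cs.drop 10)
    (cs.take 10 ++ '\\' :: 'N' :: r.1, r.2 + 1)
termination_by cs.length
decreasing_by simp; omega

lemma chunkSpec_le (cs : List Char) (h : cs.length ≤ 10) : chunkSpec cs = (cs, 1) := by
  rw [chunkSpec, dif_pos h]

lemma chunkSpec_gt (cs : List Char) (h : 10 < cs.length) :
    chunkSpec cs = (cs.take 10 ++ '\\' :: 'N' :: (chunkSpec (cs.drop 10)).1,
                    (chunkSpec (cs.drop 10)).2 + 1) := by
  rw [chunkSpec, dif_neg (by omega)]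

-- A's loop body, abstracted over the subject list
def stepA (cs : List Char) (acc : List Char × Int) (i : Int) : List Char × Int :=
  let chunk := PySem.List.slice cs (some i) (some (i + 10))
  let rt := acc.1 ++ chunk
  if i + 10 < (cs.length : Int) then (rt ++ ['\\', 'N'], acc.2 + 1)
  else (rt, acc.2)

lemma pyRange_step10_nil (a b : Int) (h : b ≤ a) : PySem.List.pyRange a b 10 = [] := by
  rw [PySem.List.pyRange_of_pos a b (by norm_num), if_neg (by omega)]
  simp

lemma pyRange_step10_cons (a b : Int) (h : a < b) :
    PySem.List.pyRange a b 10 = a :: PySem.List.pyRange (a + 10) b 10 := by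
  rw [PySem.List.pyRange_of_pos a b (by norm_num), PySem.List.pyRange_of_pos (a+10) b (by norm_num)]
  rw [if_pos h]
  by_cases h2 : a + 10 < b
  · rw [if_pos h2]
    have : ((b - a + 10 - 1) / 10).toNat = ((b - (a+10) + 10 - 1) / 10).toNat + 1 := by omega
    rw [this, List.range_succ_eq_map]
    simp [List.map_map, Function.comp]
    omega
  · rw [if_neg h2]
    have : ((b - a + 10 - 1) / 10).toNat = 1 := by omega
    rw [this]
    simp [List.range_succ]

lemma chunk_slice (cs : List Char) (i : Nat) :
    PySem.List.slice cs (some (i : Int)) (some ((i : Int) + 10)) = (cs.drop i).take 10 := by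
  rw [PySem.List.slice_toNat cs (by omega) (by omega)]
  have h1 : ((i : Int) + 10).toNat = i + 10 := by omega
  have h2 : ((i : Int)).toNat = i := by omega
  rw [h1, h2]
  congr 1
  omega

lemma loopA_eq (k : Nat) : ∀ (cs : List Char) (i : Nat) (acc : List Char) (n : Int),
    cs.length ≤ i + k →
    (PySem.List.pyRange (i : Int) (cs.length : Int) 10).foldl (stepA cs) (acc, n)
      = (acc ++ (chunkSpec (cs.drop i)).1, n + (chunkSpec (cs.drop i)).2 - 1) := by
  induction k with
  | zero =>
    intro cs i acc n hk
    rw [pyRange_step10_nil _ _ (by omega), List.drop_eq_nil_of_le (by omega),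
      chunkSpec_le _ (by simp)]
    simp
  | succ k ih =>
    intro cs i acc n hk
    by_cases hi : cs.length ≤ i
    · rw [pyRange_step10_nil _ _ (by omega), List.drop_eq_nil_of_le hi, chunkSpec_le _ (by simp)]
      simp
    · rw [pyRange_step10_cons _ _ (by omega), List.foldl_cons]
      have hdl : (cs.drop i).length = cs.length - i := by simp
      by_cases h2 : i + 10 < cs.length
      · have hstep : stepA cs (acc, n) (i : Int)
            = (acc ++ (cs.drop i).take 10 ++ ['\\', 'N'], n + 1) := by
          simp only [stepA, chunk_slice]
          rw [if_pos (by omega)]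
        rw [hstep]
        have hcast : ((i : Int) + 10) = ((i + 10 : Nat) : Int) := by push_cast; ring
        rw [hcast, ih cs (i + 10) (acc ++ (cs.drop i).take 10 ++ ['\\', 'N']) (n + 1) (by omega)]
        have hdd : (cs.drop i).drop 10 = cs.drop (i + 10) := by
          rw [List.drop_drop]
        rw [chunkSpec_gt (cs.drop i) (by rw [hdl]; omega), hdd, Prod.mk.injEq]
        refine ⟨by simp [List.append_assoc], by ring⟩
      · have hstep : stepA cs (acc, n) (i : Int) = (acc ++ (cs.drop i).take 10, n) := by
          simp only [stepA, chunk_slice]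
          rw [if_neg (by omega)]
        rw [hstep, pyRange_step10_nil _ _ (by omega),
          chunkSpec_le _ (by omega), List.take_of_length_le (by omega)]
        simp

-- B-side: altChunks unfolded into its two cases, with the slices rewritten to take/drop
lemma altChunks_le (cs : List Char) (h : cs.length ≤ 10) : altChunks cs = [cs] := by
  rw [altChunks]
  rw [PySem.List.slice_from cs (by norm_num)]
  rw [dif_pos (List.drop_eq_nil_of_le (by simpa using h))]
  rw [PySem.List.slice_to cs (by norm_num)]
  simpa using List.take_of_length_le (by simpa using h)

lemma altChunks_gt (cs : List Char) (h : 10 < cs.length) :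
    altChunks cs = cs.take 10 :: altChunks (cs.drop 10) := by
  rw [altChunks]
  rw [PySem.List.slice_from cs (by norm_num), PySem.List.slice_to cs (by norm_num)]
  rw [dif_neg (by simp; omega)]
  rw [show (10:Int).toNat = (10:Nat) from rfl]

lemma altChunks_ne_nil (cs : List Char) : altChunks cs ≠ [] := by
  by_cases h : cs.length ≤ 10
  · rw [altChunks_le cs h]; simp
  · rw [altChunks_gt cs (by omega)]; simp

-- joining B's chunk list with "\N" is exactly the chunkSpec output
lemma altChunks_join (k : Nat) : ∀ (cs : List Char), cs.length ≤ k →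
    PySem.Chars.join ['\\', 'N'] (altChunks cs) = (chunkSpec cs).1
    ∧ ((altChunks cs).length : Int) = (chunkSpec cs).2 := by
  induction k with
  | zero =>
    intro cs hk
    have : cs = [] := List.eq_nil_of_length_eq_zero (by omega)
    subst this
    rw [altChunks_le [] (by simp), chunkSpec_le [] (by simp)]
    exact ⟨PySem.Chars.join_singleton _ _, by simp⟩
  | succ k ih =>
    intro cs hk
    by_cases h : cs.length ≤ 10
    · rw [altChunks_le cs h, chunkSpec_le cs h]
      exact ⟨PySem.Chars.join_singleton _ _, by simp⟩
    · rw [altChunks_gt cs (by omega), chunkSpec_gt cs (by omega)]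
      obtain ⟨b, bs, hb⟩ : ∃ b bs, altChunks (cs.drop 10) = b :: bs := by
        rcases hr : altChunks (cs.drop 10) with _ | ⟨b, bs⟩
        · exact absurd hr (altChunks_ne_nil _)
        · exact ⟨b, bs, rfl⟩
      obtain ⟨ihj, ihl⟩ := ih (cs.drop 10) (by simp; omega)
      rw [hb] at ihj ihl ⊢
      constructor
      · rw [PySem.Chars.join_cons_cons, ihj]
        simp
      · simp at ihl ⊢
        omega

-- ===== VERDICT (by name: the statement is the Claim_ definition above) =====
theorem get_text_line_num_spec : Claim_equal_get_text_line_num := by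
  intro text _
  unfold Spec_get_text_line_num get_text_line_num get_text_line_num_alt
  obtain ⟨hj, hl⟩ := altChunks_join text.toList.length text.toList (le_refl _)
  have hjoin : PySem.Str.join "\\N" ((altChunks text.toList).map String.ofList)
      = String.ofList (chunkSpec text.toList).1 := by
    apply String.toList_inj.mp
    rw [PySem.Str.toList_join]
    simp only [List.map_map]
    have hmap : (altChunks text.toList).map (String.toList ∘ String.ofList)
        = altChunks text.toList := by simp [Function.comp_def]
    rw [hmap, show ("\\N" : String).toList = ['\\', 'N'] from rfl, hj]
    simp
  have hlen : (((altChunks text.toList).map String.ofList).length : Int)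
      = (chunkSpec text.toList).2 := by
    rw [List.length_map]; exact hl
  have hB : (PySem.Str.join "\\N" ((altChunks text.toList).map String.ofList),
        (((altChunks text.toList).map String.ofList).length : Int))
      = (String.ofList (chunkSpec text.toList).1, (chunkSpec text.toList).2) := by
    rw [hjoin, hlen]
  rw [PySem.Str.len_eq]
  by_cases h : ((text.toList.length : Nat) : Int) > 10
  · rw [if_pos h]
    have hA : (PySem.List.pyRange 0 ((text.toList.length : Nat) : Int) 10).foldl
        (stepA text.toList) ([], 1)
        = ([] ++ (chunkSpec (text.toList.drop 0)).1, 1 + (chunkSpec (text.toList.drop 0)).2 - 1) := by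
      have h0 : (0 : Int) = ((0 : Nat) : Int) := by norm_num
      rw [h0]
      exact loopA_eq text.toList.length text.toList 0 [] 1 (by omega)
    simp only [List.drop_zero, List.nil_append] at hA
    show (String.ofList ((PySem.List.pyRange 0 _ 10).foldl (stepA text.toList) ([], 1)).1,
          ((PySem.List.pyRange 0 _ 10).foldl (stepA text.toList) ([], 1)).2)
       = (PySem.Str.join "\\N" ((altChunks text.toList).map String.ofList),
          (((altChunks text.toList).map String.ofList).length : Int))
    rw [hA, hB, Prod.mk.injEq]
    exact ⟨rfl, by ring⟩
  · rw [if_neg h]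
    rw [hB, chunkSpec_le _ (by omega)]
    simp
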